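-- pv_equiv track=rewrite | github.com/zeapsu/canvas-to-notebooklm | main.py | _match_courses
-- ===== SOURCE A (Python) =====
-- def _match_courses(managed, target):
--     target_lower = target.lower()
--
--     # 1) Exact ID match
--     id_matches = [c for c in managed if str(c[0]) == target]
--     if id_matches:
--         return id_matches
--
--     # 2) Exact (case-insensitive) name match
--     exact_name_matches = [c for c in managed if (c[1] or "").strip().lower() == target_lower]
--     if exact_name_matches:
--         return exact_name_matches
--
--     # 3) Partial (case-insensitive) name match
--     partial_matches = [c for c in managed if target_lower in (c[1] or "").lower()]
--     return partial_matches
-- ===== SOURCE B (Python) =====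
-- def _match_courses(managed, target):
--     target_lower = target.lower()
--     id_matches, exact_name_matches, partial_matches = [], [], []
--     for c in managed:
--         name = c[1] or ""
--         if str(c[0]) == target:
--             id_matches.append(c)
--         if name.strip().lower() == target_lower:
--             exact_name_matches.append(c)
--         if target_lower in name.lower():
--             partial_matches.append(c)
--     if id_matches:
--         return id_matches
--     if exact_name_matches:
--         return exact_name_matches
--     return partial_matches
-- ===== Notes on version B (the rewrite author's own statement) =====
-- stated objective: alternative
-- what changed: B makes one pass over managed, classifying each course into three buckets (id / exact-name / partial), then returns the first non-empty bucket in priority order, instead of A's up-to-three separate filtering passes with early returns.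
import Mathlib
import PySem

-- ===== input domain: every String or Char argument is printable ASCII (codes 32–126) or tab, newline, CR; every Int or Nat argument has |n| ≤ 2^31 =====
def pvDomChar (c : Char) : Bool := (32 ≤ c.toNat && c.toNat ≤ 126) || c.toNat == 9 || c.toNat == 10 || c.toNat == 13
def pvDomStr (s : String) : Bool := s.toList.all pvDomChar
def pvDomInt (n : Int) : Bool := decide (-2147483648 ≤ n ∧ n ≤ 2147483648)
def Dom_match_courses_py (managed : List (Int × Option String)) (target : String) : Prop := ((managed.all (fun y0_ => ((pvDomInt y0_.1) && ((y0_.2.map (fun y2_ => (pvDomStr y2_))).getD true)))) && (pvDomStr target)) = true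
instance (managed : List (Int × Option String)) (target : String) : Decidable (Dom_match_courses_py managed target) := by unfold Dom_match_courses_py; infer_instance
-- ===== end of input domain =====

-- B classifies each course into three buckets in a single pass, then returns the first
-- non-empty bucket in priority order (alternative decomposition of A's three filter passes).


-- ===== PORT A =====
-- `c[1] or ""`: both None and "" are falsy and yield "", which is Option.getD "" exactly.
def match_courses_py (managed : List (Int × Option String)) (target : String) : List (Int × Option String) :=
  let targetLower := PySem.Str.lower target
  let idMatches := managed.filter (fun c => PySem.Int.toStr c.1 == target)
  if idMatches.isEmpty = false then idMatches
  else
    let exactNameMatches := managed.filter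
      (fun c => PySem.Str.lower (PySem.Str.strip (c.2.getD "")) == targetLower)
    if exactNameMatches.isEmpty = false then exactNameMatches
    else
      managed.filter (fun c => PySem.Str.isIn targetLower (PySem.Str.lower (c.2.getD "")))

-- ===== PORT B =====
-- single pass: one fold classifying each course into the three buckets, in order
def matchCoursesStep (target targetLower : String)
    (acc : List (Int × Option String) × List (Int × Option String) × List (Int × Option String))
    (c : Int × Option String) :
    List (Int × Option String) × List (Int × Option String) × List (Int × Option String) :=
  let name := c.2.getD ""
  let ids := if PySem.Int.toStr c.1 == target then acc.1 ++ [c] else acc.1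
  let exs := if PySem.Str.lower (PySem.Str.strip name) == targetLower then acc.2.1 ++ [c] else acc.2.1
  let parts := if PySem.Str.isIn targetLower (PySem.Str.lower name) then acc.2.2 ++ [c] else acc.2.2
  (ids, exs, parts)

def match_courses_py_alt (managed : List (Int × Option String)) (target : String) : List (Int × Option String) :=
  let targetLower := PySem.Str.lower target
  let buckets := managed.foldl (matchCoursesStep target targetLower) ([], [], [])
  if buckets.1.isEmpty = false then buckets.1
  else if buckets.2.1.isEmpty = false then buckets.2.1
  else buckets.2.2

-- ===== PRECONDITION & SPEC =====
def Spec_match_courses_py (managed : List (Int × Option String)) (target : String) (out : List (Int × Option String)) : Prop := out = match_courses_py_alt managed target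
instance (managed : List (Int × Option String)) (target : String) (out : List (Int × Option String)) : Decidable (Spec_match_courses_py managed target out) := by unfold Spec_match_courses_py; infer_instance

-- ===== CLAIM (what is proved, stated in full; the proofs are below) =====
def Claim_equal_match_courses_py : Prop := ∀ (managed : List (Int × Option String)) (target : String), Dom_match_courses_py managed target → Spec_match_courses_py managed target (match_courses_py managed target)

-- ===== LEMMAS AND PROOFS =====

-- B's fold computes the three filters A computes, each behind its own accumulator.
theorem matchCoursesStep_foldl (target targetLower : String)
    (managed : List (Int × Option String))
    (i e p : List (Int × Option String)) :
    managed.foldl (matchCoursesStep target targetLower) (i, e, p) =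
      (i ++ managed.filter (fun c => PySem.Int.toStr c.1 == target),
       e ++ managed.filter (fun c => PySem.Str.lower (PySem.Str.strip (c.2.getD "")) == targetLower),
       p ++ managed.filter (fun c => PySem.Str.isIn targetLower (PySem.Str.lower (c.2.getD "")))) := by
  induction managed generalizing i e p with
  | nil => simp
  | cons c cs ih =>
    simp only [List.foldl_cons, matchCoursesStep, List.filter_cons]
    split_ifs <;> simp [ih, List.append_assoc]

theorem match_courses_py_spec : Claim_equal_match_courses_py := by
  intro managed target _
  simp only [Spec_match_courses_py, match_courses_py, match_courses_py_alt,
    matchCoursesStep_foldl, List.nil_append]
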